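-- pv_equiv track=rewrite | github.com/studying-ice-bear/codingtest-study | 김유진/30min_Programmers/그래프/방의개수.py | solution
-- ===== SOURCE A (Python) =====
-- from collections import defaultdict
--
-- def solution(arrows):
--     answer = 0
--     visit = defaultdict(list)
--     x, y = 0, 0
--     dx, dy = [0, 1, 1, 1, 0, -1, -1, -1], [1, 1, 0, -1, -1, -1, 0, 1]
--
--     for arrow in arrows:
--         for _ in range(2):
--             nx = x + dx[arrow]
--             ny = y + dy[arrow]
--             if (nx, ny) in visit and (x, y) not in visit[(nx, ny)]:
--                 answer += 1
--                 visit[(x, y)].append((nx, ny))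
--                 visit[(nx, ny)].append((x, y))
--             elif (nx, ny) not in visit:
--                 visit[(x, y)].append((nx, ny))
--                 visit[(nx, ny)].append((x, y))
--             x, y = nx, ny
--
--     return answer
-- ===== SOURCE B (Python) =====
-- def solution(arrows):
--     # Euler-formula rewrite: collect the walk's vertex set and undirected edge set,
--     # then count rooms as E - V + 1 (the walk graph is connected; 0 when empty).
--     moves = [(0, 1), (1, 1), (1, 0), (1, -1), (0, -1), (-1, -1), (-1, 0), (-1, 1)]
--     verts = set()
--     edges = set()
--     x, y = 0, 0
--     for arrow in arrows:
--         dx, dy = moves[arrow]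
--         for _ in range(2):
--             nx, ny = x + dx, y + dy
--             u, v = (x, y), (nx, ny)
--             verts.add(u)
--             verts.add(v)
--             edges.add((u, v) if u <= v else (v, u))
--             x, y = nx, ny
--     return len(edges) - len(verts) + (1 if verts else 0)
-- ===== Notes on version B (the rewrite author's own statement) =====
-- stated objective: alternative
-- what changed: Instead of detecting cycle-closing edges online with an adjacency dict, B just collects the walk's vertex set and undirected-edge set and returns the Euler formula E - V + 1 (0 for the empty walk), which counts the rooms of the connected walk graph.
import Mathlib
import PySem

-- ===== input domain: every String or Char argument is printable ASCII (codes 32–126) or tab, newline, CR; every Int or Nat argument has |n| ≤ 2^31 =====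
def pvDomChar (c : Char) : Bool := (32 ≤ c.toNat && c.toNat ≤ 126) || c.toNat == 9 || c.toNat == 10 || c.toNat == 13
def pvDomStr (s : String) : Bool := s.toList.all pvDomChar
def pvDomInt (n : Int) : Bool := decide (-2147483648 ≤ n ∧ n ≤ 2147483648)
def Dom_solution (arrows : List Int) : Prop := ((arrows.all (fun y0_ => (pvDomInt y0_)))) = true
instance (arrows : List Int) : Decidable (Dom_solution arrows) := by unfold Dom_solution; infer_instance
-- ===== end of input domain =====

-- B rewrites the online cycle count as the Euler formula E - V + 1 over the walk's
-- vertex/edge sets (alternative decomposition, same asymptotic cost).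

-- ===== PORT A =====
def dxA : List Int := [0, 1, 1, 1, 0, -1, -1, -1]
def dyA : List Int := [1, 1, 0, -1, -1, -1, 0, 1]

structure StA where
  ans : Int
  visit : PySem.Dict (Int × Int) (List (Int × Int))
  x : Int
  y : Int

-- one inner iteration of A's `for _ in range(2)` body, given dx[arrow], dy[arrow]
def bodyA (ddx ddy : Int) (s : StA) : StA :=
  let nx := s.x + ddx
  let ny := s.y + ddy
  if s.visit.contains (nx, ny) = true ∧ (s.x, s.y) ∉ s.visit.getD (nx, ny) [] then
    let v1 := s.visit.insert (s.x, s.y) (s.visit.getD (s.x, s.y) [] ++ [(nx, ny)])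
    let v2 := v1.insert (nx, ny) (v1.getD (nx, ny) [] ++ [(s.x, s.y)])
    ⟨s.ans + 1, v2, nx, ny⟩
  else if ¬ s.visit.contains (nx, ny) = true then
    let v1 := s.visit.insert (s.x, s.y) (s.visit.getD (s.x, s.y) [] ++ [(nx, ny)])
    let v2 := v1.insert (nx, ny) (v1.getD (nx, ny) [] ++ [(s.x, s.y)])
    ⟨s.ans, v2, nx, ny⟩
  else
    ⟨s.ans, s.visit, nx, ny⟩

-- the indexing dx[arrow] / dy[arrow]; none = IndexError (excluded by Pre_)
def innerA (arrow : Int) (s : StA) : Option StA :=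
  match PySem.List.pyGet? dxA arrow, PySem.List.pyGet? dyA arrow with
  | some ddx, some ddy => some (bodyA ddx ddy s)
  | _, _ => none

def solution (arrows : List Int) : Int :=
  match arrows.foldl (fun acc arrow => (acc.bind (innerA arrow)).bind (innerA arrow))
      (some ⟨0, PySem.Dict.empty, 0, 0⟩) with
  | some s => s.ans
  | none => 0

-- ===== PORT B =====
def mvB : List (Int × Int) := [(0, 1), (1, 1), (1, 0), (1, -1), (0, -1), (-1, -1), (-1, 0), (-1, 1)]

-- Python tuple `u <= v` (lexicographic)
def ple (a b : Int × Int) : Bool := decide (a.1 < b.1) || (decide (a.1 = b.1) && decide (a.2 ≤ b.2))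

-- `(u, v) if u <= v else (v, u)`: the normalized undirected edge
def pnorm (u v : Int × Int) : (Int × Int) × (Int × Int) := if ple u v then (u, v) else (v, u)

structure StB where
  verts : PySem.Set (Int × Int)
  edges : PySem.Set ((Int × Int) × (Int × Int))
  x : Int
  y : Int

def bodyB (dd : Int × Int) (s : StB) : StB :=
  let nx := s.x + dd.1
  let ny := s.y + dd.2
  let u := (s.x, s.y)
  let v := (nx, ny)
  ⟨PySem.Set.add (PySem.Set.add s.verts u) v, PySem.Set.add s.edges (pnorm u v), nx, ny⟩

def innerB (arrow : Int) (s : StB) : Option StB :=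
  match PySem.List.pyGet? mvB arrow with
  | some dd => some (bodyB dd s)
  | none => none

def solution_alt (arrows : List Int) : Int :=
  match arrows.foldl (fun acc arrow => (acc.bind (innerB arrow)).bind (innerB arrow))
      (some ⟨PySem.Set.empty, PySem.Set.empty, 0, 0⟩) with
  | some s => (s.edges.length : Int) - (s.verts.length : Int) + (if s.verts.isEmpty then 0 else 1)
  | none => 0

-- ===== PRECONDITION & SPEC =====
-- Pre_ excludes exactly the inputs on which A raises IndexError (an arrow outside
-- Python's valid indices -8..7 for the 8-element direction lists); B raises there too.
def Pre_solution (arrows : List Int) : Prop := ∀ a ∈ arrows, -8 ≤ a ∧ a < 8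
instance (arrows : List Int) : Decidable (Pre_solution arrows) := by unfold Pre_solution; infer_instance

def pvWitness_solution : List Int := [6, 6, 6, 4, 4, 4, 2, 2, 2, 0, 0, 0, 1, 6, 5, 5, 3, 6, 0]

def Spec_solution (arrows : List Int) (out : Int) : Prop := out = solution_alt arrows
instance (arrows : List Int) (out : Int) : Decidable (Spec_solution arrows out) := by unfold Spec_solution; infer_instance

-- ===== CLAIM (what is proved, stated in full; the proofs are below) =====
def Claim_equal_solution : Prop := ∀ (arrows : List Int), Dom_solution arrows → Pre_solution arrows → Spec_solution arrows (solution arrows)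

-- ===== LEMMAS AND PROOFS =====

lemma pnorm_comm (u v : Int × Int) : pnorm u v = pnorm v u := by
  rcases u with ⟨a, b⟩; rcases v with ⟨c, d⟩
  simp only [pnorm, ple]
  split_ifs with h1 h2 h2 <;> simp_all <;> omega

lemma pnorm_norm (u v : Int × Int) : pnorm (pnorm u v).1 (pnorm u v).2 = pnorm u v := by
  rcases u with ⟨a, b⟩; rcases v with ⟨c, d⟩
  simp only [pnorm, ple]
  split_ifs <;> simp_all <;> omega

lemma pnorm_eq_iff (u v w z : Int × Int) :
    pnorm u v = pnorm w z ↔ (u = w ∧ v = z) ∨ (u = z ∧ v = w) := by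
  rcases u with ⟨a, b⟩; rcases v with ⟨c, d⟩; rcases w with ⟨e, f⟩; rcases z with ⟨g, h⟩
  simp only [pnorm, ple, Prod.mk.injEq]
  split_ifs <;> simp_all <;> omega

-- the simulation relation between A's state and B's state
def SimRel (sa : StA) (sb : StB) : Prop :=
  sb.x = sa.x ∧ sb.y = sa.y ∧
  sb.verts.Nodup ∧ sb.edges.Nodup ∧
  (∀ u, sa.visit.contains u = true ↔ u ∈ sb.verts) ∧
  (∀ u v, v ∈ sa.visit.getD u [] ↔ pnorm u v ∈ sb.edges) ∧
  (∀ e ∈ sb.edges, e = pnorm e.1 e.2) ∧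
  sa.ans = (sb.edges.length : Int) - (sb.verts.length : Int) + (if sb.verts = [] then 0 else 1) ∧
  (sb.verts = [] ∨ (sa.x, sa.y) ∈ sb.verts)

-- contains of A's double insert, as a disjunction
lemma contains_insert2 (visit : PySem.Dict (Int × Int) (List (Int × Int)))
    (u v : Int × Int) (L1 L2 : List (Int × Int)) (w : Int × Int) :
    ((visit.insert u L1).insert v L2).contains w = true ↔
      w = v ∨ w = u ∨ visit.contains w = true := by
  simp [PySem.Dict.contains_insert]

-- adjacency of A's double insert = the old edge set plus the new normalized edge
lemma adj_insert2 (visit : PySem.Dict (Int × Int) (List (Int × Int)))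
    (edges : List ((Int × Int) × (Int × Int))) (u v : Int × Int) (huv : ¬ u = v)
    (hadj : ∀ w w2, w2 ∈ visit.getD w [] ↔ pnorm w w2 ∈ edges)
    (w w2 : Int × Int) :
    w2 ∈ ((visit.insert u (visit.getD u [] ++ [v])).insert v
        ((visit.insert u (visit.getD u [] ++ [v])).getD v [] ++ [u])).getD w [] ↔
      pnorm w w2 ∈ edges ++ [pnorm u v] := by
  have hvu : ¬ v = u := fun h => huv h.symm
  have hg1 : (visit.insert u (visit.getD u [] ++ [v])).getD v [] = visit.getD v [] :=
    PySem.Dict.getD_insert_of_ne visit _ _ hvu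
  rw [PySem.Dict.getD_insert, hg1, PySem.Dict.getD_insert]
  split_ifs with h1 h2
  · subst h1
    simp only [List.mem_append, List.mem_singleton, hadj, pnorm_eq_iff]
    tauto
  · subst h2
    simp only [List.mem_append, List.mem_singleton, hadj, pnorm_eq_iff]
    tauto
  · simp only [List.mem_append, List.mem_singleton, hadj, pnorm_eq_iff]
    tauto

lemma body_rel (ddx ddy : Int) (hd : ¬(ddx = 0 ∧ ddy = 0)) {sa : StA} {sb : StB}
    (h : SimRel sa sb) : SimRel (bodyA ddx ddy sa) (bodyB (ddx, ddy) sb) := by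
  obtain ⟨ans, visit, x, y⟩ := sa
  obtain ⟨verts, edges, x', y'⟩ := sb
  obtain ⟨hx, hy, hnv, hne, hcv, hadj, hnorm, hans, hpos⟩ := h
  dsimp only at hx hy hnv hne hcv hadj hnorm hans hpos
  subst hx; subst hy
  have huv : ¬ ((x', y') : Int × Int) = (x' + ddx, y' + ddy) := by
    simp only [Prod.mk.injEq, not_and_or]
    omega
  have hmemc : ∀ (w w2 : Int × Int), w2 ∈ visit.getD w [] → visit.contains w = true := by
    intro w w2 hm
    cases hc : visit.contains w with
    | false => rw [PySem.Dict.getD_of_not_contains visit [] hc] at hm; cases hm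
    | true => rfl
  simp only [bodyA, bodyB]
  split_ifs with hb1 hb2
  -- Branch 1: new edge between two already-visited vertices (a room closes)
  · obtain ⟨hctv, hnadj⟩ := hb1
    have hvV : (x' + ddx, y' + ddy) ∈ verts := (hcv _).1 hctv
    have hvne : verts ≠ [] := fun h0 => by rw [h0] at hvV; cases hvV
    have huV : ((x', y') : Int × Int) ∈ verts := hpos.resolve_left hvne
    have hEnew : pnorm (x', y') (x' + ddx, y' + ddy) ∉ edges := by
      intro hE
      exact hnadj ((hadj _ _).2 (by rwa [pnorm_comm] at hE))
    have hBverts : PySem.Set.add (PySem.Set.add verts (x', y')) (x' + ddx, y' + ddy) = verts := by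
      rw [PySem.Set.add_of_mem huV, PySem.Set.add_of_mem hvV]
    have hBedges : PySem.Set.add edges (pnorm (x', y') (x' + ddx, y' + ddy))
        = edges ++ [pnorm (x', y') (x' + ddx, y' + ddy)] := PySem.Set.add_of_not_mem hEnew
    dsimp only [SimRel]
    refine ⟨rfl, rfl, ?_, ?_, ?_, ?_, ?_, ?_, ?_⟩
    · rw [hBverts]; exact hnv
    · exact PySem.Set.nodup_add _ _ hne
    · intro w
      rw [contains_insert2]
      simp only [PySem.Set.mem_add, hcv]
      tauto
    · intro w w2
      rw [hBedges]
      exact adj_insert2 visit edges _ _ huv hadj w w2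
    · rw [hBedges]
      intro e he
      rcases List.mem_append.1 he with hmem | hmem
      · exact hnorm e hmem
      · rw [List.mem_singleton.1 hmem]; exact (pnorm_norm _ _).symm
    · rw [hBverts, hBedges]
      rw [if_neg hvne] at hans ⊢
      simp only [List.length_append, List.length_cons, List.length_nil]
      push_cast
      omega
    · right
      exact (PySem.Set.mem_add ..).2 (Or.inr rfl)
  -- Branch 3: the edge already exists — nothing changes but the position
  · have hcvT : visit.contains (x' + ddx, y' + ddy) = true := by
      simpa using hb2
    have hmem : ((x', y') : Int × Int) ∈ visit.getD (x' + ddx, y' + ddy) [] := by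
      by_contra hm
      exact hb1 ⟨hcvT, hm⟩
    have hE : pnorm (x', y') (x' + ddx, y' + ddy) ∈ edges := by
      rw [pnorm_comm]
      exact (hadj _ _).1 hmem
    have hvV : (x' + ddx, y' + ddy) ∈ verts := (hcv _).1 hcvT
    have huV : ((x', y') : Int × Int) ∈ verts := by
      have hm2 : (x' + ddx, y' + ddy) ∈ visit.getD (x', y') [] := (hadj _ _).2 hE
      exact (hcv _).1 (hmemc _ _ hm2)
    dsimp only [SimRel]
    rw [PySem.Set.add_of_mem huV, PySem.Set.add_of_mem hvV, PySem.Set.add_of_mem hE]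
    exact ⟨rfl, rfl, hnv, hne, hcv, hadj, hnorm, hans, Or.inr hvV⟩

  -- Branch 2: edge to a brand-new vertex (tree edge)
  · have hcvF : visit.contains (x' + ddx, y' + ddy) = false := by
      simpa using hb2
    have hvNot : (x' + ddx, y' + ddy) ∉ verts := fun hm => hb2 ((hcv _).2 hm)
    have hgv : visit.getD (x' + ddx, y' + ddy) [] = [] :=
      PySem.Dict.getD_of_not_contains visit [] hcvF
    have hEnew : pnorm (x', y') (x' + ddx, y' + ddy) ∉ edges := by
      intro hE
      have hm := (hadj _ _).2 (show pnorm (x' + ddx, y' + ddy) (x', y') ∈ edges by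
        rwa [pnorm_comm] at hE)
      rw [hgv] at hm; cases hm
    have hBedges : PySem.Set.add edges (pnorm (x', y') (x' + ddx, y' + ddy))
        = edges ++ [pnorm (x', y') (x' + ddx, y' + ddy)] := PySem.Set.add_of_not_mem hEnew
    dsimp only [SimRel]
    refine ⟨rfl, rfl, ?_, ?_, ?_, ?_, ?_, ?_, ?_⟩
    · exact PySem.Set.nodup_add _ _ (PySem.Set.nodup_add _ _ hnv)
    · exact PySem.Set.nodup_add _ _ hne
    · intro w
      rw [contains_insert2]
      simp only [PySem.Set.mem_add, hcv]
      tauto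
    · intro w w2
      rw [hBedges]
      exact adj_insert2 visit edges _ _ huv hadj w w2
    · rw [hBedges]
      intro e he
      rcases List.mem_append.1 he with hmem | hmem
      · exact hnorm e hmem
      · rw [List.mem_singleton.1 hmem]; exact (pnorm_norm _ _).symm
    · by_cases huV : ((x', y') : Int × Int) ∈ verts
      · have hvne : verts ≠ [] := fun h0 => by rw [h0] at huV; cases huV
        rw [PySem.Set.add_of_mem huV, PySem.Set.add_of_not_mem hvNot, hBedges]
        rw [if_neg hvne] at hans
        rw [if_neg (show ¬ verts ++ [((x' + ddx, y' + ddy) : Int × Int)] = [] by simp)]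
        simp only [List.length_append, List.length_singleton]
        push_cast
        omega
      · have hvnil : verts = [] := hpos.resolve_right huV
        have henil : edges = [] := by
          rw [List.eq_nil_iff_forall_not_mem]
          intro e he
          have he2 := hnorm e he
          have hm : e.2 ∈ visit.getD e.1 [] := (hadj e.1 e.2).2 (by rw [← he2]; exact he)
          have h1 : e.1 ∈ verts := (hcv e.1).1 (hmemc _ _ hm)
          rw [hvnil] at h1; cases h1
        subst hvnil; subst henil
        have h1 : PySem.Set.add ([] : PySem.Set (Int × Int)) (x', y') = [(x', y')] :=
          PySem.Set.add_of_not_mem (List.not_mem_nil)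
        have h2 : PySem.Set.add [((x', y') : Int × Int)] (x' + ddx, y' + ddy)
            = [(x', y'), (x' + ddx, y' + ddy)] :=
          PySem.Set.add_of_not_mem (by simp [Prod.ext_iff] at huv ⊢; omega)
        have h3 : PySem.Set.add ([] : PySem.Set ((Int × Int) × (Int × Int)))
            (pnorm (x', y') (x' + ddx, y' + ddy)) = [pnorm (x', y') (x' + ddx, y' + ddy)] :=
          PySem.Set.add_of_not_mem (List.not_mem_nil)
        rw [h1, h2, h3]
        simp at hans
        simp [hans]
    · right
      exact (PySem.Set.mem_add ..).2 (Or.inr rfl)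
lemma inner_rel (a : Int) (h1 : -8 ≤ a) (h2 : a < 8) {sa : StA} {sb : StB} (h : SimRel sa sb) :
    ∃ sa' sb', innerA a sa = some sa' ∧ innerB a sb = some sb' ∧ SimRel sa' sb' := by
  interval_cases a <;> (refine ⟨_, _, rfl, rfl, body_rel _ _ ?_ h⟩) <;> decide

lemma fold_rel (arrows : List Int) (hpre : ∀ a ∈ arrows, -8 ≤ a ∧ a < 8)
    (sa : StA) (sb : StB) (h : SimRel sa sb) :
    ∃ sa' sb',
      arrows.foldl (fun acc arrow => (acc.bind (innerA arrow)).bind (innerA arrow)) (some sa) = some sa' ∧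
      arrows.foldl (fun acc arrow => (acc.bind (innerB arrow)).bind (innerB arrow)) (some sb) = some sb' ∧
      SimRel sa' sb' := by
  induction arrows generalizing sa sb with
  | nil => exact ⟨sa, sb, rfl, rfl, h⟩
  | cons a t ih =>
    obtain ⟨ha1, ha2⟩ := hpre a (List.mem_cons_self ..)
    obtain ⟨sa1, sb1, e1, e2, h1⟩ := inner_rel a ha1 ha2 h
    obtain ⟨sa2, sb2, e3, e4, h2⟩ := inner_rel a ha1 ha2 h1
    obtain ⟨sa', sb', e5, e6, h'⟩ := ih (fun x hx => hpre x (List.mem_cons_of_mem _ hx)) sa2 sb2 h2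
    refine ⟨sa', sb', ?_, ?_, h'⟩
    · rw [List.foldl_cons]; simpa [e1, e3] using e5
    · rw [List.foldl_cons]; simpa [e2, e4] using e6

lemma rel_init : SimRel ⟨0, PySem.Dict.empty, 0, 0⟩ ⟨PySem.Set.empty, PySem.Set.empty, 0, 0⟩ := by
  refine ⟨rfl, rfl, List.nodup_nil, List.nodup_nil, ?_, ?_, ?_, ?_, Or.inl rfl⟩ <;>
    simp [PySem.Dict.contains_empty, PySem.Dict.getD_empty, PySem.Set.empty]

-- ===== VERDICT (by name: the statement is the Claim_ definition above) =====
theorem solution_spec : Claim_equal_solution := by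
  intro arrows _ hpre
  unfold Spec_solution solution solution_alt
  obtain ⟨sa', sb', eA, eB, hrel⟩ := fold_rel arrows hpre _ _ rel_init
  rw [eA, eB]
  obtain ⟨-, -, -, -, -, -, -, hans, -⟩ := hrel
  simpa [List.isEmpty_iff] using hans
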